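-- pv_equiv track=rewrite | github.com/TumanyanArnold/Part-2 | Homework.6.py | random_sp
-- ===== SOURCE A (Python) =====
-- def random_sp (number):
--     random_dp = list()
--     limit_sp = (number + 1) // 2
--     for i in range(1, limit_sp):
--         p = i + 1
--         while i + p <= number:
--             if number % (i + p) == 0:
--                 a_ = (i, p)
--                 random_dp.append(a_)
--             p += 1
--     return random_dp
-- ===== SOURCE B (Python) =====
-- def random_sp(number):
--     divs = [s for s in range(1, number + 1) if number % s == 0]
--     return [(i, s - i) for i in range(1, (number + 1) // 2)
--                        for s in divs if s > 2 * i]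
-- ===== Notes on version B (the rewrite author's own statement) =====
-- stated objective: faster
-- what changed: B precomputes the divisor list of number in one linear pass and, for each i, emits (i, s-i) for the divisors s > 2i, instead of A's inner while loop that trial-divides number by every sum i+p.
import Mathlib
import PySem

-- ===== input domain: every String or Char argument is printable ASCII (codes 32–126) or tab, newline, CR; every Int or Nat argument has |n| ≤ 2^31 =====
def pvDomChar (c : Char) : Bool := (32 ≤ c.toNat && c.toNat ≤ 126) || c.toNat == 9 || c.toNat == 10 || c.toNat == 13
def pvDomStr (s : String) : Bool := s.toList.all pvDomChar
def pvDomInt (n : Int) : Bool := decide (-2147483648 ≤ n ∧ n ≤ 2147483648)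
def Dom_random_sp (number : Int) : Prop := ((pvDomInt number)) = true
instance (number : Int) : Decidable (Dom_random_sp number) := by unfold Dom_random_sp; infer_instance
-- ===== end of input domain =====

-- B replaces A's per-i inner while loop (which trial-divides number by every sum i+p)
-- by one precomputed divisor list of number, then emits (i, s-i) for divisors s > 2*i.

-- ===== PORT A =====
-- inner 'while i + p <= number' loop of A
def randomSpInner (number i : Int) (p : Int) (acc : List (Int × Int)) : List (Int × Int) :=
  if i + p ≤ number then
    randomSpInner number i (p + 1)
      (if PySem.Int.mod number (i + p) == 0 then acc ++ [(i, p)] else acc)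
  else acc
termination_by (number - i - p + 1).toNat
decreasing_by omega

def random_sp (number : Int) : List (Int × Int) :=
  let limit_sp := PySem.Int.floordiv (number + 1) 2
  (PySem.List.pyRange 1 limit_sp 1).foldl
    (fun acc i => randomSpInner number i (i + 1) acc) []

-- ===== PORT B =====
def random_sp_alt (number : Int) : List (Int × Int) :=
  let divs := (PySem.List.pyRange 1 (number + 1) 1).filter
      (fun s => PySem.Int.mod number s == 0)
  (PySem.List.pyRange 1 (PySem.Int.floordiv (number + 1) 2) 1).flatMap
    (fun i => (divs.filter (fun s => decide (2 * i < s))).map (fun s => (i, s - i)))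

-- ===== PRECONDITION & SPEC =====
def Spec_random_sp (number : Int) (out : List (Int × Int)) : Prop := out = random_sp_alt number
instance (number : Int) (out : List (Int × Int)) : Decidable (Spec_random_sp number out) := by unfold Spec_random_sp; infer_instance

-- ===== CLAIM (what is proved, stated in full; the proofs are below) =====
def Claim_equal_random_sp : Prop := ∀ (number : Int), Dom_random_sp number → Spec_random_sp number (random_sp number)

-- ===== LEMMAS AND PROOFS =====

-- A's inner while loop collects exactly the divisor sums s = i+p in [i+p, number].
theorem randomSpInner_eq (number i : Int) : ∀ (p : Int) (acc : List (Int × Int)),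
    randomSpInner number i p acc =
      acc ++ ((PySem.List.pyRange (i + p) (number + 1) 1).filter
          (fun s => PySem.Int.mod number s == 0)).map (fun s => (i, s - i)) := by
  intro p acc
  by_cases h : i + p ≤ number
  · rw [randomSpInner, if_pos h,
      randomSpInner_eq number i (p + 1),
      PySem.List.pyRange_one_cons (by omega : i + p < number + 1)]
    have hp : i + (p + 1) = i + p + 1 := by ring
    rw [hp, List.filter_cons]
    by_cases hd : PySem.Int.mod number (i + p) == 0
    · simp [hd]
    · simp [hd]
  · rw [randomSpInner, if_neg h,
      PySem.List.pyRange_one_eq_nil (by omega : number + 1 ≤ i + p)]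
    simp
termination_by p acc => (number - i - p + 1).toNat
decreasing_by omega

-- filtering the full divisor list to s > 2*i is filtering divisibility over [2i+1, number].
theorem filter_divs_eq (number i : Int) (h1 : 1 ≤ i) (h2 : 2 * i ≤ number) :
    ((PySem.List.pyRange 1 (number + 1) 1).filter
        (fun s => PySem.Int.mod number s == 0)).filter (fun s => decide (2 * i < s)) =
      (PySem.List.pyRange (2 * i + 1) (number + 1) 1).filter
        (fun s => PySem.Int.mod number s == 0) := by
  rw [List.filter_comm,
    PySem.List.pyRange_one_append 1 (2 * i + 1) (number + 1) (by omega) (by omega),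
    List.filter_append]
  have hl : (PySem.List.pyRange 1 (2 * i + 1) 1).filter (fun s => decide (2 * i < s)) = [] := by
    rw [List.filter_eq_nil_iff]
    intro s hs
    have := (PySem.List.mem_pyRange_one).1 hs
    simp
    omega
  have hr : (PySem.List.pyRange (2 * i + 1) (number + 1) 1).filter
      (fun s => decide (2 * i < s)) = PySem.List.pyRange (2 * i + 1) (number + 1) 1 := by
    rw [List.filter_eq_self]
    intro s hs
    have := (PySem.List.mem_pyRange_one).1 hs
    simp
    omega
  rw [hl, hr]
  rfl

-- ===== VERDICT (by name: the statement is the Claim_ definition above) =====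
theorem random_sp_spec : Claim_equal_random_sp := by
  intro number _
  unfold Spec_random_sp random_sp random_sp_alt
  simp only
  rw [PySem.List.foldl_congr_mem (g := fun acc i =>
      acc ++ (((PySem.List.pyRange 1 (number + 1) 1).filter
          (fun s => PySem.Int.mod number s == 0)).filter
            (fun s => decide (2 * i < s))).map (fun s => (i, s - i)))]
  · rw [PySem.List.foldl_append_eq_flatMap]
    simp
  · intro acc i hi
    have hmem := (PySem.List.mem_pyRange_one).1 hi
    have hfd : PySem.Int.floordiv (number + 1) 2 = (number + 1) / 2 :=
      PySem.Int.floordiv_eq_ediv_of_pos (by omega)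
    rw [hfd] at hmem
    rw [randomSpInner_eq, filter_divs_eq number i (by omega) (by omega)]
    have : i + (i + 1) = 2 * i + 1 := by ring
    rw [this]
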